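-- pv_equiv track=rewrite | github.com/oumi-ai/oumi | scripts/enterprise/plot_eval_results.py | sort_models_base_first
-- ===== SOURCE A (Python) =====
-- def sort_models_base_first(results: list[dict]) -> list[dict]:
--     """Sort results so base models come before fine-tuned models.
--
--     Base models are identified by NOT having common fine-tuning suffixes.
--     """
--     def is_base_model(row: dict) -> bool:
--         """Check if a model is a base model (not fine-tuned)."""
--         model_name = row.get("model_short", row.get("model_name", ""))
--         # Common patterns for fine-tuned models
--         ft_patterns = ["-tatqa", "-pubmedqa", "-banking", "-nl2sql", "-ft", "-sft", "-finetune"]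
--         return not any(pattern in model_name.lower() for pattern in ft_patterns)
--
--     # Separate base and fine-tuned models
--     base_models = sorted(
--         [r for r in results if is_base_model(r)],
--         key=lambda r: r.get("model_short", ""),
--     )
--     ft_models = sorted(
--         [r for r in results if not is_base_model(r)],
--         key=lambda r: r.get("model_short", ""),
--     )
--
--     # Return base models first, then fine-tuned
--     return base_models + ft_models
-- ===== SOURCE B (Python) =====
-- def sort_models_base_first(results: list[dict]) -> list[dict]:
--     """Sort results so base models come before fine-tuned models.
--
--     One-pass stable insertion sort on a composite (fine-tuned?, model_short)
--     key, instead of partitioning and sorting the two groups separately.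
--     """
--     def is_base_model(row: dict) -> bool:
--         model_name = row.get("model_short", row.get("model_name", ""))
--         ft_patterns = ["-tatqa", "-pubmedqa", "-banking", "-nl2sql", "-ft", "-sft", "-finetune"]
--         return not any(pattern in model_name.lower() for pattern in ft_patterns)
--
--     def key(r: dict):
--         return (not is_base_model(r), r.get("model_short", ""))
--
--     out: list[dict] = []
--     for r in results:
--         i = 0
--         while i < len(out) and not key(r) < key(out[i]):
--             i += 1
--         out.insert(i, r)
--     return out
-- ===== Notes on version B (the rewrite author's own statement) =====
-- stated objective: alternative
-- what changed: Replaced the partition / two library sorts / concatenate structure by a single-pass stable insertion sort that inserts each row at the first position where its composite (fine-tuned-flag, model_short) key is strictly smaller.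
import Mathlib
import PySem

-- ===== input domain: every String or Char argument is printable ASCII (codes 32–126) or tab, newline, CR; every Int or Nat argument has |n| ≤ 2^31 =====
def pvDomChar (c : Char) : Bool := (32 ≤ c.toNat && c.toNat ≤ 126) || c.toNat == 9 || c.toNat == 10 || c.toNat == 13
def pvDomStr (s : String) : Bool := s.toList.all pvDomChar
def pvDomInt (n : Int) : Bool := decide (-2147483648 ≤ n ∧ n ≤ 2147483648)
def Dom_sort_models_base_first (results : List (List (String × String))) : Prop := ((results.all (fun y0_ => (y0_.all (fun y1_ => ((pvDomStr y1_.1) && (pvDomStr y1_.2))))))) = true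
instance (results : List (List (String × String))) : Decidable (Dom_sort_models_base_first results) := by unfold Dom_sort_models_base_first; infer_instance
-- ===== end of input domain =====

-- B replaces A's partition / two library sorts / concatenate by a one-pass stable
-- insertion sort on the composite (fine-tuned?, model_short) key; objective: alternative.

-- shared helper: the inner function is_base_model, identical in both Pythons
def pvFtPatterns : List String :=
  ["-tatqa", "-pubmedqa", "-banking", "-nl2sql", "-ft", "-sft", "-finetune"]

def pvIsBase (row : List (String × String)) : Bool :=
  let d := PySem.Dict.mk row
  let modelName := ((d.get? "model_short").getD (d.getD "model_name" ""))
  !(pvFtPatterns.any (fun p => PySem.Str.isIn p (PySem.Str.lower modelName)))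

-- shared helper: r.get("model_short", ""), identical in both Pythons
def pvShort (row : List (String × String)) : String :=
  (PySem.Dict.mk row).getD "model_short" ""

-- ===== PORT A =====
def sort_models_base_first (results : List (List (String × String))) : List (List (String × String)) :=
  let base_models := PySem.List.sorted (results.filter (fun r => pvIsBase r)) (fun r => pvShort r)
  let ft_models := PySem.List.sorted (results.filter (fun r => !pvIsBase r)) (fun r => pvShort r)
  base_models ++ ft_models

-- ===== PORT B =====
-- B's key(r) = (not is_base_model(r), r.get("model_short", ""))
def pvKey (r : List (String × String)) : Bool × String := (!pvIsBase r, pvShort r)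

-- Python tuple '<' on the composite key
def pvKeyLt (a b : Bool × String) : Bool :=
  decide (a.1 < b.1) || (a.1 == b.1 && decide (a.2 < b.2))

-- B's inner while loop: walk past every element whose key is not greater,
-- insert r right before the first element with a strictly greater key
def pvInsert (r : List (String × String)) :
    List (List (String × String)) → List (List (String × String))
  | [] => [r]
  | y :: ys => if pvKeyLt (pvKey r) (pvKey y) then r :: y :: ys else y :: pvInsert r ys

def sort_models_base_first_alt (results : List (List (String × String))) : List (List (String × String)) :=
  results.foldl (fun out r => pvInsert r out) []

-- ===== PRECONDITION & SPEC =====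
def Spec_sort_models_base_first (results : List (List (String × String))) (out : List (List (String × String))) : Prop := out = sort_models_base_first_alt results
instance (results : List (List (String × String))) (out : List (List (String × String))) : Decidable (Spec_sort_models_base_first results out) := by unfold Spec_sort_models_base_first; infer_instance

-- ===== CLAIM (what is proved, stated in full; the proofs are below) =====
def Claim_equal_sort_models_base_first : Prop := ∀ (results : List (List (String × String))), Dom_sort_models_base_first results → Spec_sort_models_base_first results (sort_models_base_first results)

-- ===== LEMMAS AND PROOFS =====

-- A's within-group comparator (as sorted_eq_foldl_insertBy produces it)
def pvLtS (a b : List (String × String)) : Bool := decide (pvShort a < pvShort b)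

theorem pvKeyLt_eq_of_flag_eq (a b : List (String × String)) (h : pvIsBase a = pvIsBase b) :
    pvKeyLt (pvKey a) (pvKey b) = pvLtS a b := by
  simp [pvKeyLt, pvKey, pvLtS, h]

theorem pvKeyLt_base_ft (a b : List (String × String)) (ha : pvIsBase a = true)
    (hb : pvIsBase b = false) : pvKeyLt (pvKey a) (pvKey b) = true := by
  simp [pvKeyLt, pvKey, ha, hb]

theorem pvKeyLt_ft_base (a b : List (String × String)) (ha : pvIsBase a = false)
    (hb : pvIsBase b = true) : pvKeyLt (pvKey a) (pvKey b) = false := by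
  simp [pvKeyLt, pvKey, ha, hb]

theorem pvInsert_eq_insertBy (x : List (String × String)) (ys : List (List (String × String)))
    (h : ∀ y ∈ ys, pvKeyLt (pvKey x) (pvKey y) = pvLtS x y) :
    pvInsert x ys = PySem.List.insertBy pvLtS x ys := by
  induction ys with
  | nil => rfl
  | cons y ys ih =>
    simp only [pvInsert, PySem.List.insertBy, h y (by simp)]
    split
    · rfl
    · simpa using ih (fun y hy => h y (by simp [hy]))

theorem pvInsert_append_right (x : List (String × String))
    (bs fs : List (List (String × String)))
    (h : ∀ b ∈ bs, pvKeyLt (pvKey x) (pvKey b) = false) :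
    pvInsert x (bs ++ fs) = bs ++ pvInsert x fs := by
  induction bs with
  | nil => rfl
  | cons b bs ih =>
    simp only [List.cons_append, pvInsert, h b (by simp)]
    simpa using ih (fun b hb => h b (by simp [hb]))

theorem pvInsert_append_left (x : List (String × String))
    (bs fs : List (List (String × String)))
    (h : ∀ f ∈ fs, pvKeyLt (pvKey x) (pvKey f) = true) :
    pvInsert x (bs ++ fs) = pvInsert x bs ++ fs := by
  induction bs with
  | nil =>
    cases fs with
    | nil => rfl
    | cons f fs => simp only [List.nil_append, pvInsert, h f (by simp)]; rfl
  | cons b bs ih =>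
    simp only [List.cons_append, pvInsert]
    split
    · rfl
    · simpa using ih

-- main invariant: folding B's insertion over a base-block ++ ft-block accumulator
-- splits into A's two separate insertion folds
theorem pv_inv (xs : List (List (String × String))) :
    ∀ (bs fs : List (List (String × String))),
      (∀ b ∈ bs, pvIsBase b = true) → (∀ f ∈ fs, pvIsBase f = false) →
      xs.foldl (fun acc x => pvInsert x acc) (bs ++ fs)
        = (xs.filter (fun r => pvIsBase r)).foldl
            (fun acc x => PySem.List.insertBy pvLtS x acc) bs
          ++ (xs.filter (fun r => !pvIsBase r)).foldl
            (fun acc x => PySem.List.insertBy pvLtS x acc) fs := by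
  induction xs with
  | nil => intro bs fs _ _; rfl
  | cons x xs ih =>
    intro bs fs hbs hfs
    by_cases hx : pvIsBase x = true
    · have step : pvInsert x (bs ++ fs) = PySem.List.insertBy pvLtS x bs ++ fs := by
        rw [pvInsert_append_left x bs fs
          (fun f hf => pvKeyLt_base_ft x f hx (hfs f hf))]
        rw [pvInsert_eq_insertBy x bs
          (fun b hb => pvKeyLt_eq_of_flag_eq x b (hx.trans (hbs b hb).symm))]
      simp only [List.foldl_cons, List.filter_cons, hx, step]
      exact ih (PySem.List.insertBy pvLtS x bs) fs
        (fun b hb => by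
          rcases (PySem.List.mem_insertBy pvLtS x b bs).mp hb with h | h
          · exact h ▸ hx
          · exact hbs b h) hfs
    · have hx' : pvIsBase x = false := by simpa using hx
      have step : pvInsert x (bs ++ fs) = bs ++ PySem.List.insertBy pvLtS x fs := by
        rw [pvInsert_append_right x bs fs
          (fun b hb => pvKeyLt_ft_base x b hx' (hbs b hb))]
        rw [pvInsert_eq_insertBy x fs
          (fun f hf => pvKeyLt_eq_of_flag_eq x f (hx'.trans (hfs f hf).symm))]
      simp only [List.foldl_cons, List.filter_cons, hx', step]
      exact ih bs (PySem.List.insertBy pvLtS x fs) hbs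
        (fun f hf => by
          rcases (PySem.List.mem_insertBy pvLtS x f fs).mp hf with h | h
          · exact h ▸ hx'
          · exact hfs f h)

-- ===== VERDICT (by name: the statement is the Claim_ definition above) =====
theorem sort_models_base_first_spec : Claim_equal_sort_models_base_first := by
  intro results _
  show sort_models_base_first results = sort_models_base_first_alt results
  unfold sort_models_base_first sort_models_base_first_alt
  rw [PySem.List.sorted_eq_foldl_insertBy, PySem.List.sorted_eq_foldl_insertBy]
  exact (pv_inv results [] [] (by simp) (by simp)).symm
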